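-- pv_equiv track=rewrite | github.com/DenisTrukhin/algorithms | two-pointers/practice/goods-selection.py | select_goods
-- ===== SOURCE A (Python) =====
-- def select_goods(goods: list[int], needs: list[int]) -> int:
--     goods.sort()
--     needs.sort()
--     result = 0
--     p1 = p2 = 0
--     while p1 < len(goods) and p2 < len(needs):
--         cur_diff = abs(needs[p2] - goods[p1])
--         if p1 + 1 < len(goods) and abs(needs[p2] - goods[p1 + 1]) < cur_diff:
--             p1 += 1
--         else:
--             result += cur_diff
--             p2 += 1
--     return result
-- ===== SOURCE B (Python) =====
-- def select_goods(goods: list[int], needs: list[int]) -> int: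
--     goods.sort()
--     needs.sort()
--     if not goods:
--         return 0
--     total = 0
--     rest = goods
--     for n in needs:
--         while len(rest) > 1 and abs(n - rest[1]) < abs(n - rest[0]):
--             rest = rest[1:]
--         total += abs(n - rest[0])
--     return total
-- ===== Notes on version B (the rewrite author's own statement) =====
-- stated objective: simpler
-- what changed: Restructures the flat two-pointer state machine into a fold over the needs that first drops goods while the next one is strictly closer and then charges the current head, working on list suffixes instead of index arithmetic.
import Mathlib
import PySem

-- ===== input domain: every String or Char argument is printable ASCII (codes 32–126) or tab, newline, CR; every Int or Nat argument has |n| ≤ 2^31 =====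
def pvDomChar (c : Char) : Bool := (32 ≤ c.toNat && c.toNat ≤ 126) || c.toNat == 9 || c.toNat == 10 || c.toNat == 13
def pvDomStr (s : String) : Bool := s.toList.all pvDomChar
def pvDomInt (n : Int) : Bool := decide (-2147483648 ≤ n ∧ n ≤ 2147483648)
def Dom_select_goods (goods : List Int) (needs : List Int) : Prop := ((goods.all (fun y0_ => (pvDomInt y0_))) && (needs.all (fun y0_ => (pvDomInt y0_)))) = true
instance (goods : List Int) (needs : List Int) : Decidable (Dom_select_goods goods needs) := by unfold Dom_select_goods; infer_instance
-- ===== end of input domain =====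

-- B restructures the flat two-pointer state machine into a fold over the needs that drops goods
-- while the next one is strictly closer and then charges the current head, working on list
-- suffixes instead of index arithmetic.  Both versions sort both arguments in place on the Python
-- side; the equivalence proved here is about the return value only.

-- ===== PORT A =====
-- A's while loop over the two pointers, as a recursion on the same state (the fuel only makes the
-- recursion structural; it is provably never exhausted).
def loopA (gs ns : List Int) : Nat → Nat → Nat → Int → Int
  | 0, _, _, result => result
  | fuel + 1, p1, p2, result =>
    if p1 < gs.length ∧ p2 < ns.length then
      let cur := |ns.getD p2 0 - gs.getD p1 0|
      if p1 + 1 < gs.length ∧ |ns.getD p2 0 - gs.getD (p1 + 1) 0| < cur then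
        loopA gs ns fuel (p1 + 1) p2 result
      else
        loopA gs ns fuel p1 (p2 + 1) (result + cur)
    else result

def select_goods (goods : List Int) (needs : List Int) : Int :=
  let gs := PySem.List.sorted goods (fun x => x) false
  let ns := PySem.List.sorted needs (fun x => x) false
  loopA gs ns (gs.length + ns.length) 0 0 0

-- ===== PORT B =====
-- Source B's inner `while len(rest) > 1 and abs(n - rest[1]) < abs(n - rest[0]): rest = rest[1:]`
def dropCloser (n : Int) : List Int → List Int
  | g1 :: g2 :: t => if |n - g2| < |n - g1| then dropCloser n (g2 :: t) else g1 :: g2 :: t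
  | l => l

-- one iteration of Source B's `for n in needs` body over the state (total, rest)
def stepB (acc : Int × List Int) (n : Int) : Int × List Int :=
  let rest := dropCloser n acc.2
  (acc.1 + |n - rest.headD 0|, rest)

def select_goods_alt (goods : List Int) (needs : List Int) : Int :=
  let gs := PySem.List.sorted goods (fun x => x) false
  let ns := PySem.List.sorted needs (fun x => x) false
  if gs = [] then 0
  else (ns.foldl stepB (0, gs)).1

-- ===== PRECONDITION & SPEC =====
def Spec_select_goods (goods : List Int) (needs : List Int) (out : Int) : Prop :=
  out = select_goods_alt goods needs
instance (goods : List Int) (needs : List Int) (out : Int) : Decidable (Spec_select_goods goods needs out) := by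
  unfold Spec_select_goods; infer_instance

-- ===== CLAIM (what is proved, stated in full; the proofs are below) =====
def Claim_equal_select_goods : Prop := ∀ (goods : List Int) (needs : List Int), Dom_select_goods goods needs → Spec_select_goods goods needs (select_goods goods needs)

-- ===== LEMMAS AND PROOFS =====

-- minDist l x = the minimal |x - g| over g ∈ l (proof-side description of each charged amount)
def minDist (gs : List Int) (n : Int) : Int :=
  match gs with
  | [] => 0
  | g :: t => t.foldl (fun m g' => min m |n - g'|) |n - g|

def incPrefix : List Int → List Int
  | [] => []
  | [a] => [a]
  | a :: b :: t => if a < b then a :: incPrefix (b :: t) else [a]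

theorem incPrefix_ne_nil (l : List Int) (h : l ≠ []) : incPrefix l ≠ [] := by
  match l with
  | [] => exact absurd rfl h
  | [a] => simp [incPrefix]
  | a :: b :: t => unfold incPrefix; split <;> simp

theorem incPrefix_isPrefix (l : List Int) : incPrefix l <+: l := by
  fun_induction incPrefix l with
  | case1 => exact List.nil_prefix
  | case2 a => exact List.prefix_refl _
  | case3 a b t hab ih => exact (List.cons_prefix_cons).mpr ⟨rfl, ih⟩
  | case4 a b t hab => exact (List.cons_prefix_cons).mpr ⟨rfl, List.nil_prefix⟩

theorem incPrefix_head (b : Int) (t : List Int) : ∃ r, incPrefix (b :: t) = b :: r := by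
  cases t with
  | nil => exact ⟨[], rfl⟩
  | cons c t' =>
    unfold incPrefix
    split
    · exact ⟨_, rfl⟩
    · exact ⟨[], rfl⟩

theorem incPrefix_chain (l : List Int) : List.IsChain (· < ·) (incPrefix l) := by
  fun_induction incPrefix l with
  | case1 => simp
  | case2 a => simp
  | case3 a b t hab ih =>
    obtain ⟨r, hr⟩ := incPrefix_head b t
    rw [hr] at ih ⊢
    exact List.isChain_cons_cons.mpr ⟨hab, ih⟩
  | case4 a b t hab => simp

theorem incPrefix_break (l : List Int) (hl : l.Pairwise (· ≤ ·))
    (h : (incPrefix l).length < l.length) :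
    l.getD ((incPrefix l).length - 1) 0 = l.getD ((incPrefix l).length) 0 := by
  fun_induction incPrefix l with
  | case1 => simp at h
  | case2 a => simp at h
  | case3 a b t hab ih =>
    have hne := incPrefix_ne_nil (b :: t) (by simp)
    have hpos : 0 < (incPrefix (b :: t)).length := List.length_pos_iff.mpr hne
    obtain ⟨m', hm'⟩ : ∃ m', (incPrefix (b :: t)).length = m' + 1 :=
      ⟨(incPrefix (b :: t)).length - 1, by omega⟩
    have hlt : (incPrefix (b :: t)).length < (b :: t).length := by
      simp at h ⊢; omega
    have := ih (List.Pairwise.of_cons hl) hlt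
    simp only [List.length_cons, hm'] at *
    simpa [List.getD_cons_succ] using this
  | case4 a b t hab =>
    have hab' : a ≤ b := (List.pairwise_cons.mp hl).1 b (by simp)
    have : a = b := le_antisymm hab' (by omega)
    simp [this]

theorem incPrefix_getD (l : List Int) (k : Nat) (hk : k < (incPrefix l).length) :
    (incPrefix l).getD k 0 = l.getD k 0 := by
  rw [List.getD_eq_getElem _ _ hk,
      List.getD_eq_getElem _ _ (lt_of_lt_of_le hk (incPrefix_isPrefix l).length_le)]
  exact (incPrefix_isPrefix l).getElem hk

theorem incPrefix_strict (l : List Int) (k : Nat) (hk : k + 1 < (incPrefix l).length) :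
    l.getD k 0 < l.getD (k + 1) 0 := by
  have hc := (List.isChain_iff_getElem.mp (incPrefix_chain l)) k hk
  rw [← incPrefix_getD l k (by omega), ← incPrefix_getD l (k + 1) hk,
      List.getD_eq_getElem _ _ (show k < (incPrefix l).length by omega),
      List.getD_eq_getElem _ _ hk]
  exact hc

-- ---- sorted getD monotonicity ----
theorem pairwise_getD_mono (l : List Int) (h : l.Pairwise (· ≤ ·)) (i j : Nat)
    (hij : i ≤ j) (hj : j < l.length) : l.getD i 0 ≤ l.getD j 0 := by
  rw [List.getD_eq_getElem _ _ (lt_of_le_of_lt hij hj), List.getD_eq_getElem _ _ hj]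
  rcases Nat.lt_or_ge i j with hlt | hge
  · exact (List.pairwise_iff_getElem.mp h) i j _ _ hlt
  · have : i = j := by omega
    subst this; rfl

-- ---- minDist facts ----
theorem foldlMin_le_init (x : Int) (t : List Int) : ∀ init : Int,
    t.foldl (fun m g => min m |x - g|) init ≤ init := by
  induction t with
  | nil => intro init; simp
  | cons a t ih =>
    intro init
    calc t.foldl (fun m g => min m |x - g|) (min init |x - a|) ≤ min init |x - a| := ih _
      _ ≤ init := min_le_left _ _

theorem foldlMin_le_mem (x g : Int) (t : List Int) (hg : g ∈ t) : ∀ init : Int,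
    t.foldl (fun m g' => min m |x - g'|) init ≤ |x - g| := by
  induction t with
  | nil => simp at hg
  | cons a t ih =>
    intro init
    rcases List.mem_cons.mp hg with rfl | hmem
    · calc t.foldl (fun m g' => min m |x - g'|) (min init |x - g|) ≤ min init |x - g| :=
        foldlMin_le_init x t _
        _ ≤ |x - g| := min_le_right _ _
    · exact ih hmem _

theorem foldlMin_cases (x : Int) (t : List Int) : ∀ init : Int,
    t.foldl (fun m g => min m |x - g|) init = init ∨
      ∃ g ∈ t, t.foldl (fun m g' => min m |x - g'|) init = |x - g| := by
  induction t with
  | nil => intro init; left; rfl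
  | cons a t ih =>
    intro init
    rcases ih (min init |x - a|) with h | ⟨g, hg, h⟩
    · rcases min_cases init |x - a| with ⟨hm, _⟩ | ⟨hm, _⟩
      · left; simpa [hm] using h
      · right; exact ⟨a, by simp, by simpa [hm] using h⟩
    · right; exact ⟨g, by simp [hg], h⟩

theorem minDist_le (x g : Int) (l : List Int) (hg : g ∈ l) : minDist l x ≤ |x - g| := by
  cases l with
  | nil => simp at hg
  | cons a t =>
    rcases List.mem_cons.mp hg with rfl | hmem
    · exact foldlMin_le_init x t _
    · exact foldlMin_le_mem x g t hmem _

theorem minDist_mem (x : Int) (l : List Int) (h : l ≠ []) :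
    ∃ g ∈ l, minDist l x = |x - g| := by
  cases l with
  | nil => exact absurd rfl h
  | cons a t =>
    rcases foldlMin_cases x t |x - a| with h' | ⟨g, hg, h'⟩
    · exact ⟨a, by simp, h'⟩
    · exact ⟨g, by simp [hg], h'⟩

theorem minDist_eq_of (x g0 : Int) (l : List Int) (h0 : g0 ∈ l)
    (hmin : ∀ g ∈ l, |x - g0| ≤ |x - g|) : minDist l x = |x - g0| := by
  refine le_antisymm (minDist_le x g0 l h0) ?_
  obtain ⟨g, hg, he⟩ := minDist_mem x l (List.ne_nil_of_mem h0)
  rw [he]; exact hmin g hg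

-- ---- abs arithmetic ----
theorem abs_transfer (a b x x' : Int) (hab : a ≤ b) (hx : x ≤ x')
    (h : |x - b| < |x - a|) : |x' - b| < |x' - a| := by
  simp only [Int.abs_eq_natAbs] at *; omega

theorem abs_stop (a b c x : Int) (hab : a < b) (hbc : b ≤ c)
    (h : ¬ |x - b| < |x - a|) : |x - a| ≤ |x - c| := by
  simp only [Int.abs_eq_natAbs] at *; omega

-- ---- chained strict decrease gives a minimum at the end ----
theorem chain_min (d : Nat → Int) (p1 : Nat) (h : ∀ k, k + 1 ≤ p1 → d (k + 1) < d k) :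
    ∀ k, k ≤ p1 → d p1 ≤ d k := by
  induction p1 with
  | zero =>
    intro k hk
    have : k = 0 := by omega
    subst this; rfl
  | succ n ih =>
    intro k hk
    rcases Nat.eq_or_lt_of_le hk with rfl | hlt
    · rfl
    · have h1 : d (n + 1) < d n := h n (by omega)
      have h2 : d n ≤ d k := ih (fun k hk => h k (by omega)) k (by omega)
      omega

-- A's pointer value is the minimum over the strictly increasing prefix
theorem cur_eq_minDist (gs : List Int) (x : Int) (p1 : Nat)
    (hgs : gs.Pairwise (· ≤ ·))
    (hp1 : p1 < (incPrefix gs).length)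
    (hstop : ¬(p1 + 1 < gs.length ∧ |x - gs.getD (p1 + 1) 0| < |x - gs.getD p1 0|))
    (hchain : ∀ k, k + 1 ≤ p1 → |x - gs.getD (k + 1) 0| < |x - gs.getD k 0|) :
    minDist (incPrefix gs) x = |x - gs.getD p1 0| := by
  have hlen : (incPrefix gs).length ≤ gs.length := (incPrefix_isPrefix gs).length_le
  have hg0mem : gs.getD p1 0 ∈ incPrefix gs := by
    rw [← incPrefix_getD gs p1 hp1, List.getD_eq_getElem _ _ hp1]
    exact List.getElem_mem hp1
  refine minDist_eq_of x (gs.getD p1 0) (incPrefix gs) hg0mem ?_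
  intro g hg
  obtain ⟨k, hk, rfl⟩ := List.mem_iff_getElem.mp hg
  rw [← List.getD_eq_getElem _ 0 hk, incPrefix_getD gs k hk]
  rcases Nat.lt_or_ge p1 k with hkgt | hkle
  case inr => exact chain_min (fun k => |x - gs.getD k 0|) p1 hchain k hkle
  case inl => -- p1 < k < (incPrefix gs).length : distances are non-decreasing past p1
    have hlt1 : p1 + 1 < gs.length := by omega
    have hge : ¬ |x - gs.getD (p1 + 1) 0| < |x - gs.getD p1 0| := fun hc => hstop ⟨hlt1, hc⟩
    have hab : gs.getD p1 0 < gs.getD (p1 + 1) 0 := incPrefix_strict gs p1 (by omega)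
    have hbc : gs.getD (p1 + 1) 0 ≤ gs.getD k 0 := pairwise_getD_mono gs hgs (p1 + 1) k (by omega) (by omega)
    exact abs_stop _ _ _ _ hab hbc hge

theorem advance_lt (gs : List Int) (x : Int) (p1 : Nat)
    (hgs : gs.Pairwise (· ≤ ·)) (hp1 : p1 < (incPrefix gs).length)
    (hlt : p1 + 1 < gs.length)
    (hstrict : |x - gs.getD (p1 + 1) 0| < |x - gs.getD p1 0|) :
    p1 + 1 < (incPrefix gs).length := by
  by_contra hc
  have hlen : (incPrefix gs).length = p1 + 1 := by omega
  have hbreak := incPrefix_break gs hgs (by omega)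
  rw [hlen] at hbreak
  simp only [Nat.add_sub_cancel] at hbreak
  rw [← hbreak] at hstrict
  omega

theorem loopA_exit (gs ns : List Int) (fuel p1 p2 : Nat) (acc : Int)
    (h : ¬(p1 < gs.length ∧ p2 < ns.length)) : loopA gs ns fuel p1 p2 acc = acc := by
  cases fuel <;> simp [loopA, h]

theorem loopA_eq (gs ns : List Int) (hgs : gs.Pairwise (· ≤ ·)) (hns : ns.Pairwise (· ≤ ·)) :
    ∀ (fuel p1 p2 : Nat) (acc : Int),
      (gs.length - p1) + (ns.length - p2) ≤ fuel →
      p1 < (incPrefix gs).length →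
      (∀ k, k + 1 ≤ p1 → ∀ j, p2 ≤ j → j < ns.length →
        |ns.getD j 0 - gs.getD (k + 1) 0| < |ns.getD j 0 - gs.getD k 0|) →
      loopA gs ns fuel p1 p2 acc =
        acc + ((ns.drop p2).map (fun n => minDist (incPrefix gs) n)).sum := by
  intro fuel
  induction fuel with
  | zero =>
    intro p1 p2 acc hfuel hp1 hinv
    have := (incPrefix_isPrefix gs).length_le
    omega
  | succ fuel ih =>
    intro p1 p2 acc hfuel hp1 hinv
    have hlen : (incPrefix gs).length ≤ gs.length := (incPrefix_isPrefix gs).length_le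
    have hp1g : p1 < gs.length := by omega
    by_cases hc : p1 < gs.length ∧ p2 < ns.length
    · rw [show loopA gs ns (fuel + 1) p1 p2 acc =
        (if p1 < gs.length ∧ p2 < ns.length then
          if p1 + 1 < gs.length ∧
              |ns.getD p2 0 - gs.getD (p1 + 1) 0| < |ns.getD p2 0 - gs.getD p1 0| then
            loopA gs ns fuel (p1 + 1) p2 acc
          else
            loopA gs ns fuel p1 (p2 + 1) (acc + |ns.getD p2 0 - gs.getD p1 0|)
        else acc) from rfl, if_pos hc]
      by_cases hadv : p1 + 1 < gs.length ∧
          |ns.getD p2 0 - gs.getD (p1 + 1) 0| < |ns.getD p2 0 - gs.getD p1 0|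
      · -- advance p1
        rw [if_pos hadv]
        refine ih (p1 + 1) p2 acc (by omega) (advance_lt gs (ns.getD p2 0) p1 hgs hp1 hadv.1 hadv.2) ?_
        intro k hk j hj hjlen
        rcases Nat.lt_or_ge k p1 with hklt | hkge
        · exact hinv k (by omega) j hj hjlen
        · have hkp : k = p1 := by omega
          subst hkp
          have hxx' : ns.getD p2 0 ≤ ns.getD j 0 := pairwise_getD_mono ns hns p2 j hj hjlen
          have hab : gs.getD k 0 ≤ gs.getD (k + 1) 0 :=
            pairwise_getD_mono gs hgs k (k + 1) (by omega) hadv.1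
          exact abs_transfer _ _ _ _ hab hxx' hadv.2
      · -- charge the current need and advance p2
        rw [if_neg hadv]
        have hrec := ih p1 (p2 + 1) (acc + |ns.getD p2 0 - gs.getD p1 0|) (by omega) hp1
          (fun k hk j hj hjlen => hinv k hk j (by omega) hjlen)
        rw [hrec]
        have hcur : minDist (incPrefix gs) (ns.getD p2 0) = |ns.getD p2 0 - gs.getD p1 0| :=
          cur_eq_minDist gs (ns.getD p2 0) p1 hgs hp1 hadv
            (fun k hk => hinv k hk p2 (le_refl p2) hc.2)
        rw [List.drop_eq_getElem_cons hc.2, List.map_cons, List.sum_cons,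
          ← List.getD_eq_getElem ns 0 hc.2, hcur]
        ring
    · rw [loopA_exit gs ns (fuel + 1) p1 p2 acc hc]
      have hp2 : ns.length ≤ p2 := by omega
      rw [List.drop_eq_nil_of_le hp2]
      simp

theorem select_goods_eq (goods needs : List Int) :
    select_goods goods needs =
      if PySem.List.sorted goods (fun x => x) false = [] then 0
      else ((PySem.List.sorted needs (fun x => x) false).map
        (fun n => minDist (incPrefix (PySem.List.sorted goods (fun x => x) false)) n)).sum := by
  have hgs : (PySem.List.sorted goods (fun x => x) false).Pairwise (· ≤ ·) := by
    simpa using PySem.List.sorted_pairwise (xs := goods) (key := fun x => x)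
  have hns : (PySem.List.sorted needs (fun x => x) false).Pairwise (· ≤ ·) := by
    simpa using PySem.List.sorted_pairwise (xs := needs) (key := fun x => x)
  by_cases h : PySem.List.sorted goods (fun x => x) false = []
  · rw [if_pos h]
    unfold select_goods
    rw [loopA_exit _ _ _ _ _ _ (by simp [h])]
  · rw [if_neg h]
    unfold select_goods
    rw [loopA_eq _ _ hgs hns _ 0 0 0 (by omega)
      (List.length_pos_iff.mpr (incPrefix_ne_nil _ h))
      (by intro k hk; omega)]
    simp


-- ===== the same characterization for B's fold =====

theorem dropCloser_single (n : Int) (l : List Int) (h : l.length ≤ 1) : dropCloser n l = l := by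
  match l with
  | [] => rfl
  | [a] => rfl
  | a :: b :: t => simp at h

theorem dropCloser_cons_cons (n g1 g2 : Int) (t : List Int) :
    dropCloser n (g1 :: g2 :: t)
      = if |n - g2| < |n - g1| then dropCloser n (g2 :: t) else g1 :: g2 :: t := rfl

theorem dropCloser_spec (gs : List Int) (hgs : gs.Pairwise (· ≤ ·)) (n : Int) :
    ∀ (fuel p : Nat), gs.length - p ≤ fuel → p < (incPrefix gs).length →
      ∃ p', p ≤ p' ∧ p' < (incPrefix gs).length ∧ dropCloser n (gs.drop p) = gs.drop p' ∧
        (∀ k, p ≤ k → k + 1 ≤ p' → |n - gs.getD (k + 1) 0| < |n - gs.getD k 0|) ∧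
        ¬(p' + 1 < gs.length ∧ |n - gs.getD (p' + 1) 0| < |n - gs.getD p' 0|) := by
  intro fuel
  induction fuel with
  | zero =>
    intro p hfuel hp
    have := (incPrefix_isPrefix gs).length_le
    omega
  | succ fuel ih =>
    intro p hfuel hp
    have hlen : (incPrefix gs).length ≤ gs.length := (incPrefix_isPrefix gs).length_le
    have hplen : p < gs.length := by omega
    by_cases h1 : p + 1 < gs.length
    · have hd1 : gs.drop p = gs[p] :: gs.drop (p + 1) := List.drop_eq_getElem_cons hplen
      have hd2 : gs.drop (p + 1) = gs[p + 1] :: gs.drop (p + 2) := by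
        simpa using List.drop_eq_getElem_cons h1
      by_cases hstrict : |n - gs.getD (p + 1) 0| < |n - gs.getD p 0|
      · -- the next good is strictly closer: drop one and continue
        have hstrict' : |n - gs[p + 1]| < |n - gs[p]| := by
          rw [List.getD_eq_getElem _ _ h1, List.getD_eq_getElem _ _ hplen] at hstrict
          exact hstrict
        have hstep : dropCloser n (gs.drop p) = dropCloser n (gs.drop (p + 1)) := by
          rw [hd1, hd2, dropCloser_cons_cons, if_pos hstrict']
        obtain ⟨p', hle, hp', heq, hchain, hstop⟩ :=
          ih (p + 1) (by omega) (advance_lt gs n p hgs hp h1 hstrict)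
        refine ⟨p', by omega, hp', by rw [hstep, heq], ?_, hstop⟩
        intro k hk1 hk2
        rcases Nat.eq_or_lt_of_le hk1 with rfl | hklt
        · exact hstrict
        · exact hchain k (by omega) hk2
      · -- stop here
        have hstrict' : ¬ |n - gs[p + 1]| < |n - gs[p]| := by
          rw [List.getD_eq_getElem _ _ h1, List.getD_eq_getElem _ _ hplen] at hstrict
          exact hstrict
        refine ⟨p, le_refl p, hp, ?_, by omega, fun hc => hstrict hc.2⟩
        rw [hd1, hd2, dropCloser_cons_cons, if_neg hstrict']
    · -- rest has a single element: the while loop does not run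
      refine ⟨p, le_refl p, hp, ?_, by omega, fun hc => h1 hc.1⟩
      exact dropCloser_single n (gs.drop p) (by rw [List.length_drop]; omega)

theorem headD_drop (gs : List Int) (p : Nat) (hp : p < gs.length) :
    (gs.drop p).headD 0 = gs.getD p 0 := by
  rw [List.drop_eq_getElem_cons hp, List.getD_eq_getElem _ _ hp]
  rfl

theorem foldB_eq (gs : List Int) (hgs : gs.Pairwise (· ≤ ·)) :
    ∀ (ns : List Int), ns.Pairwise (· ≤ ·) → ∀ (p : Nat) (acc : Int),
      p < (incPrefix gs).length →
      (∀ k, k + 1 ≤ p → ∀ n ∈ ns, |n - gs.getD (k + 1) 0| < |n - gs.getD k 0|) →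
      (ns.foldl stepB (acc, gs.drop p)).1 =
        acc + (ns.map (fun n => minDist (incPrefix gs) n)).sum := by
  intro ns
  induction ns with
  | nil => intro _ p acc _ _; simp
  | cons n ns' ih =>
    intro hns p acc hp hinv
    have hlen : (incPrefix gs).length ≤ gs.length := (incPrefix_isPrefix gs).length_le
    obtain ⟨p', hle, hp', heq, hchain, hstop⟩ :=
      dropCloser_spec gs hgs n (gs.length - p) p (le_refl _) hp
    have hchainn : ∀ k, k + 1 ≤ p' → |n - gs.getD (k + 1) 0| < |n - gs.getD k 0| := by
      intro k hk
      rcases Nat.lt_or_ge k p with hklt | hkge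
      · exact hinv k (by omega) n (by simp)
      · exact hchain k hkge hk
    have hcur : |n - gs.getD p' 0| = minDist (incPrefix gs) n :=
      (cur_eq_minDist gs n p' hgs hp' hstop hchainn).symm
    have hstepv : stepB (acc, gs.drop p) n = (acc + minDist (incPrefix gs) n, gs.drop p') := by
      unfold stepB
      simp only [heq]
      rw [headD_drop gs p' (by omega), hcur]
    rw [List.foldl_cons, hstepv]
    rw [ih (List.Pairwise.of_cons hns) p' (acc + minDist (incPrefix gs) n) hp' ?_]
    · simp [add_assoc]
    · intro k hk n' hn'
      have hnn' : n ≤ n' := (List.pairwise_cons.mp hns).1 n' hn'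
      rcases Nat.lt_or_ge k p with hklt | hkge
      · exact hinv k (by omega) n' (by simp [hn'])
      · have hs := hchain k hkge hk
        have hab : gs.getD k 0 ≤ gs.getD (k + 1) 0 :=
          pairwise_getD_mono gs hgs k (k + 1) (by omega) (by omega)
        exact abs_transfer _ _ _ _ hab hnn' hs

theorem select_goods_alt_eq (goods needs : List Int) :
    select_goods_alt goods needs =
      if PySem.List.sorted goods (fun x => x) false = [] then 0
      else ((PySem.List.sorted needs (fun x => x) false).map
        (fun n => minDist (incPrefix (PySem.List.sorted goods (fun x => x) false)) n)).sum := by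
  have hgs : (PySem.List.sorted goods (fun x => x) false).Pairwise (· ≤ ·) := by
    simpa using PySem.List.sorted_pairwise (xs := goods) (key := fun x => x)
  have hns : (PySem.List.sorted needs (fun x => x) false).Pairwise (· ≤ ·) := by
    simpa using PySem.List.sorted_pairwise (xs := needs) (key := fun x => x)
  unfold select_goods_alt
  by_cases h : PySem.List.sorted goods (fun x => x) false = []
  · simp [h]
  · rw [if_neg h, if_neg h]
    have h0 : PySem.List.sorted goods (fun x => x) false
        = (PySem.List.sorted goods (fun x => x) false).drop 0 := rfl
    conv_lhs => rw [h0]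
    rw [foldB_eq _ hgs _ hns 0 0
      (List.length_pos_iff.mpr (incPrefix_ne_nil _ h)) (by intro k hk; omega)]
    simp

-- ===== VERDICT (by name: the statement is the Claim_ definition above) =====
theorem select_goods_spec : Claim_equal_select_goods := by
  intro goods needs _
  unfold Spec_select_goods
  rw [select_goods_eq, select_goods_alt_eq]
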